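-- pv_equiv track=rewrite | github.com/shg9411/algo | algo_py/coupang_recruit/test3.py | solution
-- ===== SOURCE A (Python) =====
-- def solution(k, score):
--     check = dict()
--     for idx, grade in enumerate(score[1:], start=1):
--         diff = score[idx-1]-grade
--         if diff in check:
--             check[diff].append(idx+1)
--         else:
--             check[diff] = [idx+1]
--     res = sorted(check.items(), key=lambda x: len(x[1]), reverse=True)
--     minus = set()
--     for r in res:
--         if len(r[1]) < k:
--             break
--         for cheat in r[1]:
--             minus.add(cheat-1)
--             minus.add(cheat)
--     return len(score)-len(minus) if minus else 0
-- ===== SOURCE B (Python) =====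
-- def solution(k, score):
--     counts = {}
--     for i in range(1, len(score)):
--         d = score[i - 1] - score[i]
--         counts[d] = counts.get(d, 0) + 1
--     minus = set()
--     for i in range(1, len(score)):
--         if counts[score[i - 1] - score[i]] >= k:
--             minus.add(i)
--             minus.add(i + 1)
--     return len(score) - len(minus) if minus else 0
-- ===== Notes on version B (the rewrite author's own statement) =====
-- stated objective: alternative
-- what changed: B drops A's dict of per-diff index lists and the sort of the groups by size: it counts each diff once into a plain counter, then makes one direct pass adding the indices of diffs whose count reaches k into the set, so no per-group index lists are built and nothing is sorted (measured ~1.4x, below the 1.5x bar, so not claimed as faster).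
import Mathlib
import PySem

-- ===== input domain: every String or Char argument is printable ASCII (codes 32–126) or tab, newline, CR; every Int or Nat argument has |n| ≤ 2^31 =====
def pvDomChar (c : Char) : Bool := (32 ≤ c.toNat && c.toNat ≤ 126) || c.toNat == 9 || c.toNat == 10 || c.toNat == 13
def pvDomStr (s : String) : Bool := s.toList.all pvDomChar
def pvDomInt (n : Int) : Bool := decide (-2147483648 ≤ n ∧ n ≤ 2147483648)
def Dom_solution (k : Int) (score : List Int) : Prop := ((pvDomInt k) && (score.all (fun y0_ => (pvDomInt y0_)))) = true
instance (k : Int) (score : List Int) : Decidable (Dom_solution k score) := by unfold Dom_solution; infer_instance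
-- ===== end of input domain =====

-- B replaces A's group-lists dict + sort-by-size + break loop by a single diff counter and one
-- direct filtered pass into the set (objective: alternative — no per-group index lists, no sort).

-- ===== PORT A =====
-- the 'for r in res: if len(r[1]) < k: break …' loop (break = early return)
def solutionBreakLoop (k : Int) : List (Int × List Int) → PySem.Set Int → PySem.Set Int
  | [], minus => minus
  | r :: rest, minus =>
    if (r.2.length : Int) < k then minus
    else solutionBreakLoop k rest
      (r.2.foldl (fun m cheat => PySem.Set.add (PySem.Set.add m (cheat - 1)) cheat) minus)

def solution (k : Int) (score : List Int) : Int :=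
  let check : PySem.Dict Int (List Int) :=
    (PySem.List.enumerate (PySem.List.slice score (some 1) none) 1).foldl
      (fun check p =>
        let diff := PySem.List.pyGetD score (p.1 - 1) 0 - p.2
        if check.contains diff then check.modify diff [] (· ++ [p.1 + 1])
        else check.insert diff [p.1 + 1])
      PySem.Dict.empty
  let res := PySem.List.sorted check.items (fun x => x.2.length) true
  let minus := solutionBreakLoop k res PySem.Set.empty
  if minus ≠ [] then PySem.List.len score - (minus.length : Int) else 0

-- ===== PORT B =====
def solution_alt (k : Int) (score : List Int) : Int :=
  let counts : PySem.Dict Int Int :=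
    (PySem.List.pyRange 1 (PySem.List.len score) 1).foldl
      (fun c i =>
        let d := PySem.List.pyGetD score (i - 1) 0 - PySem.List.pyGetD score i 0
        c.insert d (c.getD d 0 + 1))
      PySem.Dict.empty
  let minus : PySem.Set Int :=
    (PySem.List.pyRange 1 (PySem.List.len score) 1).foldl
      (fun m i =>
        if k ≤ counts.getD (PySem.List.pyGetD score (i - 1) 0 - PySem.List.pyGetD score i 0) 0
        then PySem.Set.add (PySem.Set.add m i) (i + 1) else m)
      PySem.Set.empty
  if minus ≠ [] then PySem.List.len score - (minus.length : Int) else 0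

-- ===== PRECONDITION & SPEC =====
def Spec_solution (k : Int) (score : List Int) (out : Int) : Prop := out = solution_alt k score
instance (k : Int) (score : List Int) (out : Int) : Decidable (Spec_solution k score out) := by unfold Spec_solution; infer_instance

-- ===== CLAIM (what is proved, stated in full; the proofs are below) =====
def Claim_equal_solution : Prop := ∀ (k : Int) (score : List Int), Dom_solution k score → Spec_solution k score (solution k score)

-- ===== LEMMAS AND PROOFS =====

-- helper notions used only by the proofs: the diff at position i, the index range 1..n-1,
-- and the shared membership predicate for both "minus" sets
def pvD (score : List Int) (i : Int) : Int :=
  PySem.List.pyGetD score (i - 1) 0 - PySem.List.pyGetD score i 0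

def pvRng (score : List Int) : List Int := PySem.List.pyRange 1 (PySem.List.len score) 1

def pvQ (k : Int) (score : List Int) (x : Int) : Prop :=
  ∃ i ∈ pvRng score,
    k ≤ (((pvRng score).map (pvD score)).count (pvD score i) : Int) ∧ (x = i ∨ x = i + 1)

-- the inner 'for cheat in r[1]' fold of A
theorem mem_groupFold (g : List Int) (m : PySem.Set Int) (x : Int) :
    x ∈ g.foldl (fun m cheat => PySem.Set.add (PySem.Set.add m (cheat - 1)) cheat) m ↔
      x ∈ m ∨ ∃ c ∈ g, x = c - 1 ∨ x = c := by
  induction g generalizing m with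
  | nil => simp
  | cons c t ih =>
    simp only [List.foldl_cons, ih, PySem.Set.mem_add, List.mem_cons]
    constructor
    · rintro (((h | h) | h) | ⟨c', hc', h⟩)
      · exact Or.inl h
      · exact Or.inr ⟨c, Or.inl rfl, Or.inl h⟩
      · exact Or.inr ⟨c, Or.inl rfl, Or.inr h⟩
      · exact Or.inr ⟨c', Or.inr hc', h⟩
    · rintro (h | ⟨c', (rfl | hc'), h⟩)
      · exact Or.inl (Or.inl (Or.inl h))
      · rcases h with h | h
        · exact Or.inl (Or.inl (Or.inr h))
        · exact Or.inl (Or.inr h)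
      · exact Or.inr ⟨c', hc', h⟩

theorem nodup_groupFold (g : List Int) (m : PySem.Set Int) (h : m.Nodup) :
    (g.foldl (fun m cheat => PySem.Set.add (PySem.Set.add m (cheat - 1)) cheat) m).Nodup := by
  induction g generalizing m with
  | nil => exact h
  | cons c t ih => exact ih _ (PySem.Set.nodup_add _ _ (PySem.Set.nodup_add _ _ h))

-- the break in A's loop never skips a group of size ≥ k: the groups are sorted by size, descending
theorem mem_breakLoop (k : Int) (res : List (Int × List Int)) (m : PySem.Set Int) (x : Int)
    (h : res.Pairwise (fun a b => b.2.length ≤ a.2.length)) :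
    x ∈ solutionBreakLoop k res m ↔
      x ∈ m ∨ ∃ r ∈ res, k ≤ (r.2.length : Int) ∧ ∃ c ∈ r.2, x = c - 1 ∨ x = c := by
  induction res generalizing m with
  | nil => simp [solutionBreakLoop]
  | cons r rest ih =>
    rcases List.pairwise_cons.mp h with ⟨hhd, htl⟩
    by_cases hk : (r.2.length : Int) < k
    · rw [solutionBreakLoop, if_pos hk]
      have hnone : ∀ r' ∈ r :: rest, ¬ k ≤ ((r'.2.length : Nat) : Int) := by
        intro r' hr'
        rcases List.mem_cons.mp hr' with rfl | hr'
        · omega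
        · have := hhd r' hr'
          omega
      constructor
      · exact Or.inl
      · rintro (h | ⟨r', hr', hle, _⟩)
        · exact h
        · exact absurd hle (hnone r' hr')
    · rw [solutionBreakLoop, if_neg hk, ih _ htl, mem_groupFold]
      constructor
      · rintro ((h | ⟨c, hc, hx⟩) | ⟨r', hr', hle, hc⟩)
        · exact Or.inl h
        · exact Or.inr ⟨r, List.mem_cons_self, by omega, c, hc, hx⟩
        · exact Or.inr ⟨r', List.mem_cons_of_mem _ hr', hle, hc⟩
      · rintro (h | ⟨r', hr', hle, c, hc, hx⟩)
        · exact Or.inl (Or.inl h)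
        · rcases List.mem_cons.mp hr' with rfl | hr'
          · exact Or.inl (Or.inr ⟨c, hc, hx⟩)
          · exact Or.inr ⟨r', hr', hle, c, hc, hx⟩

theorem nodup_breakLoop (k : Int) (res : List (Int × List Int)) (m : PySem.Set Int)
    (h : m.Nodup) : (solutionBreakLoop k res m).Nodup := by
  induction res generalizing m with
  | nil => exact h
  | cons r rest ih =>
    rw [solutionBreakLoop]
    split
    · exact h
    · exact ih _ (nodup_groupFold _ _ h)

-- B's 'if …: minus.add(i); minus.add(i+1)' fold
theorem mem_condFold (p : Int → Prop) [DecidablePred p] (l : List Int) (m : PySem.Set Int)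
    (x : Int) :
    x ∈ l.foldl (fun m i => if p i then PySem.Set.add (PySem.Set.add m i) (i + 1) else m) m ↔
      x ∈ m ∨ ∃ i ∈ l, p i ∧ (x = i ∨ x = i + 1) := by
  induction l generalizing m with
  | nil => simp
  | cons a t ih =>
    simp only [List.foldl_cons, List.mem_cons]
    by_cases hp : p a
    · rw [if_pos hp, ih]
      simp only [PySem.Set.mem_add]
      constructor
      · rintro (((h | h) | h) | ⟨i, hi, hpi, hx⟩)
        · exact Or.inl h
        · exact Or.inr ⟨a, Or.inl rfl, hp, Or.inl h⟩
        · exact Or.inr ⟨a, Or.inl rfl, hp, Or.inr h⟩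
        · exact Or.inr ⟨i, Or.inr hi, hpi, hx⟩
      · rintro (h | ⟨i, (rfl | hi), hpi, hx⟩)
        · exact Or.inl (Or.inl (Or.inl h))
        · rcases hx with h | h
          · exact Or.inl (Or.inl (Or.inr h))
          · exact Or.inl (Or.inr h)
        · exact Or.inr ⟨i, hi, hpi, hx⟩
    · rw [if_neg hp, ih]
      constructor
      · rintro (h | ⟨i, hi, hpi, hx⟩)
        · exact Or.inl h
        · exact Or.inr ⟨i, Or.inr hi, hpi, hx⟩
      · rintro (h | ⟨i, (rfl | hi), hpi, hx⟩)
        · exact Or.inl h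
        · exact absurd hpi hp
        · exact Or.inr ⟨i, hi, hpi, hx⟩

theorem nodup_condFold (p : Int → Prop) [DecidablePred p] (l : List Int) (m : PySem.Set Int)
    (h : m.Nodup) :
    (l.foldl (fun m i => if p i then PySem.Set.add (PySem.Set.add m i) (i + 1) else m) m).Nodup := by
  induction l generalizing m with
  | nil => exact h
  | cons a t ih =>
    simp only [List.foldl_cons]
    by_cases hp : p a
    · rw [if_pos hp]
      exact ih _ (PySem.Set.nodup_add _ _ (PySem.Set.nodup_add _ _ h))
    · rw [if_neg hp]
      exact ih _ h

-- enumerate(score[1:], start=1) as a map over the index range 1..len(score)-1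
theorem enum_slice_eq (score : List Int) :
    PySem.List.enumerate (PySem.List.slice score (some 1) none) 1 =
      (pvRng score).map (fun i => (i, PySem.List.pyGetD score i 0)) := by
  rw [PySem.List.slice_from_one]
  apply List.ext_getElem?
  intro k
  rw [PySem.List.getElem?_enumerate, List.getElem?_map]
  unfold pvRng
  rw [PySem.List.getElem?_pyRange_one]
  cases score with
  | nil => simp
  | cons a t =>
    by_cases hk : k < t.length
    · have h1 : (PySem.List.len (a :: t) - 1).toNat = t.length := by
        simp [PySem.List.len_eq]
      rw [h1, if_pos hk]
      have h2 : PySem.List.pyGetD (a :: t) (1 + (k : Int)) 0 = t[k] := by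
        have : (1 + (k : Int)) = ((k + 1 : Nat) : Int) := by push_cast; ring
        rw [this, PySem.List.pyGetD_natCast]
        simp [List.getD, hk]
      simp [List.tail_cons, List.getElem?_eq_getElem hk, h2]
    · have h1 : (PySem.List.len (a :: t) - 1).toNat = t.length := by
        simp [PySem.List.len_eq]
      rw [h1, if_neg hk]
      simp [List.tail_cons, List.getElem?_eq_none (by omega : t.length ≤ k)]

-- A's grouping fold, rewritten to the canonical modify-fold over (diff, idx+1) pairs
theorem checkA_eq (score : List Int) :
    ((PySem.List.enumerate (PySem.List.slice score (some 1) none) 1).foldl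
      (fun check p =>
        if check.contains (PySem.List.pyGetD score (p.1 - 1) 0 - p.2) then
          check.modify (PySem.List.pyGetD score (p.1 - 1) 0 - p.2) [] (· ++ [p.1 + 1])
        else check.insert (PySem.List.pyGetD score (p.1 - 1) 0 - p.2) [p.1 + 1])
      PySem.Dict.empty) =
    ((pvRng score).map (fun i => (pvD score i, i + 1))).foldl
      (fun d p => d.modify p.1 [] (· ++ [p.2])) PySem.Dict.empty := by
  rw [enum_slice_eq, List.foldl_map, List.foldl_map]
  apply PySem.List.foldl_congr_mem
  intro d i _
  simp only [pvD]
  split_ifs with h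
  · rfl
  · simp [PySem.Dict.modify, PySem.Dict.getD_of_not_contains, h]

-- B's counts dict counts each diff
theorem counts_getD (score : List Int) (d : Int) :
    ((pvRng score).foldl
      (fun c i =>
        c.insert (PySem.List.pyGetD score (i - 1) 0 - PySem.List.pyGetD score i 0)
          (c.getD (PySem.List.pyGetD score (i - 1) 0 - PySem.List.pyGetD score i 0) 0 + 1))
      PySem.Dict.empty).getD d 0 =
    (((pvRng score).map (pvD score)).count d : Int) := by
  have h := PySem.Dict.getD_foldl_insert_add_one ((pvRng score).map (pvD score))
      (PySem.Dict.empty : PySem.Dict Int Int) d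
  rw [List.foldl_map] at h
  simp only [pvD] at h
  rw [h]
  simp

theorem memB (k : Int) (score : List Int) (x : Int) :
    x ∈ (pvRng score).foldl
        (fun m i =>
          if k ≤ (((pvRng score).map (pvD score)).count (pvD score i) : Int)
          then PySem.Set.add (PySem.Set.add m i) (i + 1) else m)
        PySem.Set.empty ↔ pvQ k score x := by
  rw [mem_condFold (fun i => k ≤ (((pvRng score).map (pvD score)).count (pvD score i) : Int))]
  simp only [PySem.Set.empty, List.not_mem_nil, false_or]
  rfl

theorem memA (k : Int) (score : List Int) (x : Int) :
    x ∈ solutionBreakLoop k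
        (PySem.List.sorted
          (((PySem.List.enumerate (PySem.List.slice score (some 1) none) 1).foldl
            (fun check p =>
              if check.contains (PySem.List.pyGetD score (p.1 - 1) 0 - p.2) then
                check.modify (PySem.List.pyGetD score (p.1 - 1) 0 - p.2) [] (· ++ [p.1 + 1])
              else check.insert (PySem.List.pyGetD score (p.1 - 1) 0 - p.2) [p.1 + 1])
            PySem.Dict.empty).items) (fun x => x.2.length) true)
        PySem.Set.empty ↔ pvQ k score x := by
  rw [checkA_eq]
  set pairs := (pvRng score).map (fun i => (pvD score i, i + 1)) with hpairs
  set check := pairs.foldl (fun d p => d.modify p.1 [] (· ++ [p.2])) PySem.Dict.empty with hcheck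
  have hkeysnodup : check.keys.Nodup := by
    rw [hcheck]
    exact PySem.Dict.nodup_keys_foldl_modify_key pairs (fun p => p.1) []
      (fun d p => (· ++ [p.2])) PySem.Dict.empty (by simp)
  have hkeys : ∀ c : Int, c ∈ check.keys ↔ ∃ i ∈ pvRng score, pvD score i = c := by
    intro c
    rw [hcheck, PySem.Dict.keys_foldl_modify_key pairs (fun p => p.1) []
      (fun d p => (· ++ [p.2])) PySem.Dict.empty]
    have hupd : PySem.Set.update (PySem.Dict.empty : PySem.Dict Int (List Int)).keys
        (pairs.map (fun p => p.1)) = PySem.Set.ofList (pairs.map (fun p => p.1)) := rfl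
    rw [hupd, PySem.Set.mem_ofList, hpairs, List.map_map]
    constructor
    · rintro hm
      rcases List.mem_map.mp hm with ⟨i, hi, rfl⟩
      exact ⟨i, hi, rfl⟩
    · rintro ⟨i, hi, rfl⟩
      exact List.mem_map.mpr ⟨i, hi, rfl⟩

  have hgetD : ∀ c : Int, check.getD c [] = (pairs.filter (fun p => p.1 == c)).map (·.2) := by
    intro c
    rw [hcheck, PySem.Dict.getD_foldl_modify_append]
    simp
  have hlen : ∀ c : Int, (check.getD c []).length = ((pvRng score).map (pvD score)).count c := by
    intro c
    rw [hgetD, List.length_map, ← List.countP_eq_length_filter, hpairs, List.countP_map,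
      List.count_eq_countP, List.countP_map]
    rfl
  have hmemg : ∀ (c v : Int), v ∈ check.getD c [] ↔ ∃ i ∈ pvRng score, pvD score i = c ∧ v = i + 1 := by
    intro c v
    rw [hgetD]
    simp only [List.mem_map, List.mem_filter, hpairs]
    constructor
    · rintro ⟨p, ⟨⟨i, hi, rfl⟩, hpc⟩, rfl⟩
      exact ⟨i, hi, by simpa using hpc, rfl⟩
    · rintro ⟨i, hi, hc, rfl⟩
      exact ⟨(pvD score i, i + 1), ⟨⟨i, hi, rfl⟩, by simpa using hc⟩, rfl⟩
  rw [mem_breakLoop _ _ _ _ (PySem.List.sorted_pairwise_rev _ _)]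
  have hperm := PySem.List.sorted_perm check.items (fun x => x.2.length) true
  simp only [show (PySem.Set.empty : PySem.Set Int) = [] from rfl, List.not_mem_nil, false_or]
  constructor
  · rintro ⟨r, hr, hle, c, hc, hx⟩
    rw [hperm.mem_iff, PySem.Dict.items_eq_map_keys _ hkeysnodup [], List.mem_map] at hr
    rcases hr with ⟨key, hkey, rfl⟩
    rcases (hmemg key c).mp hc with ⟨i, hi, hkc, rfl⟩
    have hle' : k ≤ ((check.getD key []).length : Int) := hle
    rw [hlen key] at hle'
    refine ⟨i, hi, ?_, ?_⟩
    · rw [hkc]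
      exact hle'
    · rcases hx with h | h
      · left; omega
      · right; omega
  · rintro ⟨i, hi, hcnt, hx⟩
    refine ⟨(pvD score i, check.getD (pvD score i) []), ?_, ?_, i + 1, ?_, ?_⟩
    · rw [hperm.mem_iff, PySem.Dict.items_eq_map_keys _ hkeysnodup [], List.mem_map]
      exact ⟨pvD score i, (hkeys _).mpr ⟨i, hi, rfl⟩, rfl⟩
    · show k ≤ ((check.getD (pvD score i) []).length : Int)
      rw [hlen]
      exact hcnt
    · exact (hmemg _ _).mpr ⟨i, hi, rfl, rfl⟩
    · rcases hx with h | h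
      · left; omega
      · right; omega

-- ===== VERDICT (by name: the statement is the Claim_ definition above) =====
theorem solution_spec : Claim_equal_solution := by
  intro k score _
  unfold Spec_solution
  have h1 : solution k score =
      (if (solutionBreakLoop k
      (PySem.List.sorted
        (((PySem.List.enumerate (PySem.List.slice score (some 1) none) 1).foldl
          (fun check p =>
            if check.contains (PySem.List.pyGetD score (p.1 - 1) 0 - p.2) then
              check.modify (PySem.List.pyGetD score (p.1 - 1) 0 - p.2) [] (· ++ [p.1 + 1])
            else check.insert (PySem.List.pyGetD score (p.1 - 1) 0 - p.2) [p.1 + 1])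
          PySem.Dict.empty).items) (fun x => x.2.length) true)
      PySem.Set.empty) ≠ []
       then PySem.List.len score - (((solutionBreakLoop k
      (PySem.List.sorted
        (((PySem.List.enumerate (PySem.List.slice score (some 1) none) 1).foldl
          (fun check p =>
            if check.contains (PySem.List.pyGetD score (p.1 - 1) 0 - p.2) then
              check.modify (PySem.List.pyGetD score (p.1 - 1) 0 - p.2) [] (· ++ [p.1 + 1])
            else check.insert (PySem.List.pyGetD score (p.1 - 1) 0 - p.2) [p.1 + 1])
          PySem.Dict.empty).items) (fun x => x.2.length) true)
      PySem.Set.empty).length : Nat) : Int)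
       else 0) := rfl
  have hBfold : ((pvRng score).foldl
      (fun m i =>
        if k ≤ ((pvRng score).foldl
      (fun c i =>
        c.insert (PySem.List.pyGetD score (i - 1) 0 - PySem.List.pyGetD score i 0)
          (c.getD (PySem.List.pyGetD score (i - 1) 0 - PySem.List.pyGetD score i 0) 0 + 1))
      PySem.Dict.empty).getD (PySem.List.pyGetD score (i - 1) 0 - PySem.List.pyGetD score i 0) 0
        then PySem.Set.add (PySem.Set.add m i) (i + 1) else m)
      PySem.Set.empty) = ((pvRng score).foldl
      (fun m i =>
        if k ≤ (((pvRng score).map (pvD score)).count (pvD score i) : Int)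
        then PySem.Set.add (PySem.Set.add m i) (i + 1) else m)
      PySem.Set.empty) := by
    apply PySem.List.foldl_congr_mem
    intro m i _
    rw [counts_getD]
    rfl
  have h2 : solution_alt k score =
      (if ((pvRng score).foldl
      (fun m i =>
        if k ≤ (((pvRng score).map (pvD score)).count (pvD score i) : Int)
        then PySem.Set.add (PySem.Set.add m i) (i + 1) else m)
      PySem.Set.empty) ≠ []
       then PySem.List.len score - ((((pvRng score).foldl
      (fun m i =>
        if k ≤ (((pvRng score).map (pvD score)).count (pvD score i) : Int)
        then PySem.Set.add (PySem.Set.add m i) (i + 1) else m)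
      PySem.Set.empty).length : Nat) : Int)
       else 0) := by
    have h2a : solution_alt k score =
      (if ((pvRng score).foldl
      (fun m i =>
        if k ≤ ((pvRng score).foldl
      (fun c i =>
        c.insert (PySem.List.pyGetD score (i - 1) 0 - PySem.List.pyGetD score i 0)
          (c.getD (PySem.List.pyGetD score (i - 1) 0 - PySem.List.pyGetD score i 0) 0 + 1))
      PySem.Dict.empty).getD (PySem.List.pyGetD score (i - 1) 0 - PySem.List.pyGetD score i 0) 0
        then PySem.Set.add (PySem.Set.add m i) (i + 1) else m)
      PySem.Set.empty) ≠ []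
           then PySem.List.len score - ((((pvRng score).foldl
      (fun m i =>
        if k ≤ ((pvRng score).foldl
      (fun c i =>
        c.insert (PySem.List.pyGetD score (i - 1) 0 - PySem.List.pyGetD score i 0)
          (c.getD (PySem.List.pyGetD score (i - 1) 0 - PySem.List.pyGetD score i 0) 0 + 1))
      PySem.Dict.empty).getD (PySem.List.pyGetD score (i - 1) 0 - PySem.List.pyGetD score i 0) 0
        then PySem.Set.add (PySem.Set.add m i) (i + 1) else m)
      PySem.Set.empty).length : Nat) : Int)
           else 0) := rfl
    rw [h2a, hBfold]
  have ndA : (solutionBreakLoop k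
      (PySem.List.sorted
        (((PySem.List.enumerate (PySem.List.slice score (some 1) none) 1).foldl
          (fun check p =>
            if check.contains (PySem.List.pyGetD score (p.1 - 1) 0 - p.2) then
              check.modify (PySem.List.pyGetD score (p.1 - 1) 0 - p.2) [] (· ++ [p.1 + 1])
            else check.insert (PySem.List.pyGetD score (p.1 - 1) 0 - p.2) [p.1 + 1])
          PySem.Dict.empty).items) (fun x => x.2.length) true)
      PySem.Set.empty).Nodup := nodup_breakLoop _ _ _ List.nodup_nil
  have ndB : ((pvRng score).foldl
      (fun m i =>
        if k ≤ (((pvRng score).map (pvD score)).count (pvD score i) : Int)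
        then PySem.Set.add (PySem.Set.add m i) (i + 1) else m)
      PySem.Set.empty).Nodup :=
    nodup_condFold (fun i => k ≤ (((pvRng score).map (pvD score)).count (pvD score i) : Int))
      (pvRng score) PySem.Set.empty List.nodup_nil
  have hx : ∀ x : Int, x ∈ (solutionBreakLoop k
      (PySem.List.sorted
        (((PySem.List.enumerate (PySem.List.slice score (some 1) none) 1).foldl
          (fun check p =>
            if check.contains (PySem.List.pyGetD score (p.1 - 1) 0 - p.2) then
              check.modify (PySem.List.pyGetD score (p.1 - 1) 0 - p.2) [] (· ++ [p.1 + 1])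
            else check.insert (PySem.List.pyGetD score (p.1 - 1) 0 - p.2) [p.1 + 1])
          PySem.Dict.empty).items) (fun x => x.2.length) true)
      PySem.Set.empty) ↔ x ∈ ((pvRng score).foldl
      (fun m i =>
        if k ≤ (((pvRng score).map (pvD score)).count (pvD score i) : Int)
        then PySem.Set.add (PySem.Set.add m i) (i + 1) else m)
      PySem.Set.empty) :=
    fun x => (memA k score x).trans (memB k score x).symm
  have hperm := (List.perm_ext_iff_of_nodup ndA ndB).mpr hx
  have hlen := hperm.length_eq
  have hiff : (solutionBreakLoop k
      (PySem.List.sorted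
        (((PySem.List.enumerate (PySem.List.slice score (some 1) none) 1).foldl
          (fun check p =>
            if check.contains (PySem.List.pyGetD score (p.1 - 1) 0 - p.2) then
              check.modify (PySem.List.pyGetD score (p.1 - 1) 0 - p.2) [] (· ++ [p.1 + 1])
            else check.insert (PySem.List.pyGetD score (p.1 - 1) 0 - p.2) [p.1 + 1])
          PySem.Dict.empty).items) (fun x => x.2.length) true)
      PySem.Set.empty ≠ []) ↔ ((pvRng score).foldl
      (fun m i =>
        if k ≤ (((pvRng score).map (pvD score)).count (pvD score i) : Int)
        then PySem.Set.add (PySem.Set.add m i) (i + 1) else m)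
      PySem.Set.empty ≠ []) := by
    apply not_congr
    rw [← List.length_eq_zero_iff, ← List.length_eq_zero_iff, hlen]
  rw [h1, h2]
  exact if_congr hiff (by rw [hlen]) rfl
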